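-- pv_equiv track=rewrite | github.com/adamkohazi/wincent_dragonbyte | qualification/number_pairs/number_pairs.py | generate_numbers_with_digit_sum
-- ===== SOURCE A (Python) =====
-- def generate_numbers_with_digit_sum(target_sum, d):
--     seen = set()
--     def backtrack(current, length, digit_sum, max_length):
--         if length == max_length:
--             if digit_sum == target_sum:
--                 num = int(current)
--                 # Check if num + d or num - d exists in seen set
--                 if (num + d) in seen:
--                     return (num, num + d)
--                 if (num - d) in seen:
--                     return (num - d, num)
--                 seen.add(num)
--             return None
--
--         for digit in range(10):
--             if length == 0 and digit == 0:
--                 continue  # Skip leading zero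
--             if digit_sum + digit <= target_sum:
--                 res = backtrack(current + str(digit), length + 1, digit_sum + digit, max_length)
--                 if res is not None:
--                     return res
--         return None
--
--     for digits in range(1, 19):
--         result = backtrack("", 0, 0, digits)
--         if result is not None:
--             return result
--
--     return None
-- ===== SOURCE B (Python) =====
-- def digit_sum(n):
--     s = 0
--     while n > 0:
--         s += n % 10
--         n //= 10
--     return s
--
--
-- def generate_numbers_with_digit_sum(target_sum, d):
--     # Two numbers with equal digit sums are congruent mod 9, so their
--     # difference is a (nonzero) multiple of 9 -- otherwise no pair exists.
--     if d == 0 or d % 9 != 0: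
--         return None
--     k = d if d > 0 else -d
--     # Enumerate the numbers with digit sum == target_sum in ascending order
--     # (per digit count, via an explicit stack of (value, remaining digits,
--     # remaining sum) frames) and test the partner arithmetically.
--     for num_digits in range(1, 19):
--         stack = []
--         for first in range(9, 0, -1):
--             if first <= target_sum:
--                 stack.append((first, num_digits - 1, target_sum - first))
--         while stack:
--             value, rem, need = stack.pop()
--             if rem == 0:
--                 if need == 0:
--                     other = value - k
--                     if other >= 1 and digit_sum(other) == target_sum:
--                         return (value, other) if d < 0 else (other, value)
--             else:
--                 for dig in range(9, -1, -1):
--                     if dig <= need: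
--                         stack.append((value * 10 + dig, rem - 1, need - dig))
--     return None
-- ===== Notes on version B (the rewrite author's own statement) =====
-- stated objective: alternative
-- what changed: Replaces A's string-building recursive backtracking with a persistent seen-set by a mod-9 feasibility early exit (equal digit sums force the difference to be a multiple of 9) plus an explicit-stack numeric enumeration of the same candidates in the same order, testing the partner pair arithmetically instead of via a seen-set.
import Mathlib
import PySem

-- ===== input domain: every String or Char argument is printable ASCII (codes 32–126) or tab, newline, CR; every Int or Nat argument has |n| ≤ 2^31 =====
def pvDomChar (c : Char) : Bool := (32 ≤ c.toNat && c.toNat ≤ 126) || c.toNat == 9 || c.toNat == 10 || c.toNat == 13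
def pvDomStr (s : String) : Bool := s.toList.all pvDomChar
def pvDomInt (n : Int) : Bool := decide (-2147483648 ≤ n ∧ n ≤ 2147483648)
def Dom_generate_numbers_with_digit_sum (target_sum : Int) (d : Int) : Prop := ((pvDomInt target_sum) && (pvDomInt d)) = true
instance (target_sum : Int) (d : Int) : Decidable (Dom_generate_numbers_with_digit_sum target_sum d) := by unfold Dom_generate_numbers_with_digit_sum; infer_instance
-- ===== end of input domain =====

-- B replaces A's string-building backtracking recursion with a mod-9 feasibility
-- early exit plus an explicit-stack numeric enumeration that tests the partner
-- arithmetically instead of maintaining a seen-set (objective: alternative).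


-- ===== PORT A =====

-- int(current): A only ever parses the nonempty '0'..'9' strings it built itself
-- (no sign, no whitespace, no underscores); on those int() is exactly this fold.
def pvIntOfDigits (cs : List Char) : Int :=
  cs.foldl (fun a c => 10 * a + ((c.toNat : Int) - 48)) 0

mutual
  -- backtrack(current, length, digit_sum, max_length); the mutable outer 'seen' set
  -- is threaded through and returned.  'fuel' only justifies Lean termination:
  -- every reachable call has length ≤ max_length ≤ 18 and starts with fuel = 19,
  -- so the fuel-0 branch is never taken.
  def pvBacktrack (target_sum d : Int) (fuel : Nat) (current : List Char)
      (length digit_sum max_length : Int) (seen : PySem.Set Int) :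
      Option (Int × Int) × PySem.Set Int :=
    match fuel with
    | 0 => (none, seen)
    | fuel + 1 =>
      if length == max_length then
        if digit_sum == target_sum then
          let num := pvIntOfDigits current
          if PySem.Set.contains seen (num + d) then (some (num, num + d), seen)
          else if PySem.Set.contains seen (num - d) then (some (num - d, num), seen)
          else (none, PySem.Set.add seen num)
        else (none, seen)
      else
        pvDigitLoop target_sum d fuel current length digit_sum max_length seen
          (PySem.List.pyRange 0 10 1)
  termination_by (fuel, 0)

  -- the 'for digit in range(10)' loop inside backtrack (early return on some)
  def pvDigitLoop (target_sum d : Int) (fuel : Nat) (current : List Char)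
      (length digit_sum max_length : Int) (seen : PySem.Set Int) :
      List Int → Option (Int × Int) × PySem.Set Int
    | [] => (none, seen)
    | digit :: rest =>
      if length == 0 && digit == 0 then
        pvDigitLoop target_sum d fuel current length digit_sum max_length seen rest
      else if digit_sum + digit ≤ target_sum then
        match pvBacktrack target_sum d fuel (current ++ PySem.Int.toChars digit)
            (length + 1) (digit_sum + digit) max_length seen with
        | (some r, seen') => (some r, seen')
        | (none, seen') =>
          pvDigitLoop target_sum d fuel current length digit_sum max_length seen' rest
      else pvDigitLoop target_sum d fuel current length digit_sum max_length seen rest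
  termination_by l => (fuel, l.length + 1)
end

-- 'for digits in range(1, 19): … return result if not None'; seen persists across lengths
def pvLengthLoop (target_sum d : Int) : List Int → PySem.Set Int → Option (Int × Int)
  | [], _ => none
  | digits :: rest, seen =>
    match pvBacktrack target_sum d 19 [] 0 0 digits seen with
    | (some r, _) => some r
    | (none, seen') => pvLengthLoop target_sum d rest seen'

def generate_numbers_with_digit_sum (target_sum : Int) (d : Int) : Option (Int × Int) :=
  pvLengthLoop target_sum d (PySem.List.pyRange 1 19 1) PySem.Set.empty

-- ===== PORT B =====

-- digit_sum(n): 'while n > 0: s += n % 10; n //= 10'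
def pvDigitSum (n : Int) : Int :=
  if 0 < n then PySem.Int.mod n 10 + pvDigitSum (PySem.Int.floordiv n 10) else 0
termination_by n.toNat
decreasing_by
  rw [PySem.Int.floordiv_eq_ediv_of_pos (by norm_num)]
  omega

-- stack measure used only for Lean termination of the while loop
def pvMeasure (st : List (Int × Nat × Int)) : Nat :=
  (st.map (fun f => 11 ^ f.2.1)).sum

theorem pvMeasure_foldl_push (l : List Int) (v need : Int) (r : Nat) :
    ∀ st, pvMeasure (l.foldl
        (fun st dig => if dig ≤ need then (v * 10 + dig, r, need - dig) :: st else st) st)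
      ≤ l.length * 11 ^ r + pvMeasure st := by
  induction l with
  | nil => intro st; simp
  | cons x l ih =>
    intro st
    simp only [List.foldl_cons, List.length_cons]
    refine le_trans (ih _) ?_
    have : pvMeasure (if x ≤ need then (v * 10 + x, r, need - x) :: st else st)
        ≤ 11 ^ r + pvMeasure st := by
      split <;> simp [pvMeasure]
    calc l.length * 11 ^ r + pvMeasure (if x ≤ need then (v * 10 + x, r, need - x) :: st else st)
        ≤ l.length * 11 ^ r + (11 ^ r + pvMeasure st) := by omega
      _ ≤ (l.length + 1) * 11 ^ r + pvMeasure st := by rw [Nat.succ_mul]; omega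

-- 'while stack: value, rem, need = stack.pop(); …'; the list head is the stack top,
-- the remaining-digit count of a frame is kept as a Nat (it is nonnegative on every
-- reachable frame).
def pvRun (target_sum d k : Int) (stack : List (Int × Nat × Int)) : Option (Int × Int) :=
  match stack with
  | [] => none
  | (value, rem, need) :: st =>
    match rem with
    | 0 =>
      if need == 0 then
        let other := value - k
        if 1 ≤ other ∧ pvDigitSum other = target_sum then
          if d < 0 then some (value, other) else some (other, value)
        else pvRun target_sum d k st
      else pvRun target_sum d k st
    | rem' + 1 =>
      pvRun target_sum d k
        ((PySem.List.pyRange 9 (-1) (-1)).foldl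
          (fun st dig => if dig ≤ need then (value * 10 + dig, rem', need - dig) :: st else st) st)
termination_by pvMeasure stack
decreasing_by
  all_goals first
  | (simp [pvMeasure]; done)
  | (refine lt_of_le_of_lt (pvMeasure_foldl_push _ _ _ _ _) ?_
     have h1 : 0 < 11 ^ rem' := Nat.pow_pos (by norm_num : 0 < 11)
     have hlen : (PySem.List.pyRange 9 (-1) (-1)).length = 10 := by decide
     rw [hlen]
     simp only [pvMeasure, List.map_cons, List.sum_cons, pow_succ]
     omega)

-- 'stack = []; for first in range(9, 0, -1): if first <= target_sum: stack.append(…)'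
def pvInitStack (target_sum num_digits : Int) : List (Int × Nat × Int) :=
  (PySem.List.pyRange 9 0 (-1)).foldl
    (fun st first => if first ≤ target_sum then (first, (num_digits - 1).toNat, target_sum - first) :: st else st) []

-- 'for num_digits in range(1, 19): …'
def pvLenLoop (target_sum d k : Int) : List Int → Option (Int × Int)
  | [] => none
  | num_digits :: rest =>
    match pvRun target_sum d k (pvInitStack target_sum num_digits) with
    | some r => some r
    | none => pvLenLoop target_sum d k rest

def generate_numbers_with_digit_sum_alt (target_sum : Int) (d : Int) : Option (Int × Int) :=
  if d == 0 || PySem.Int.mod d 9 != 0 then none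
  else pvLenLoop target_sum d (if 0 < d then d else -d) (PySem.List.pyRange 1 19 1)

-- ===== PRECONDITION & SPEC =====
def Spec_generate_numbers_with_digit_sum (target_sum : Int) (d : Int) (out : Option (Int × Int)) : Prop := out = generate_numbers_with_digit_sum_alt target_sum d
instance (target_sum : Int) (d : Int) (out : Option (Int × Int)) : Decidable (Spec_generate_numbers_with_digit_sum target_sum d out) := by unfold Spec_generate_numbers_with_digit_sum; infer_instance

-- ===== CLAIM (what is proved, stated in full; the proofs are below) =====
def Claim_equal_generate_numbers_with_digit_sum : Prop := ∀ (target_sum : Int) (d : Int), Dom_generate_numbers_with_digit_sum target_sum d → Spec_generate_numbers_with_digit_sum target_sum d (generate_numbers_with_digit_sum target_sum d)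

-- ===== LEMMAS AND PROOFS =====

-- ---------- digit-sum facts ----------

theorem pvDigitSum_nonpos {n : Int} (h : n ≤ 0) : pvDigitSum n = 0 := by
  rw [pvDigitSum, if_neg (by omega)]

theorem pvDigitSum_nonneg (n : Int) : 0 ≤ pvDigitSum n := by
  induction n using pvDigitSum.induct with
  | case1 n h ih =>
    rw [pvDigitSum, if_pos h]
    have := PySem.Int.mod_nonneg (a := n) (b := 10) (by norm_num)
    omega
  | case2 n h => rw [pvDigitSum, if_neg h]

theorem pvDigitSum_step {n : Int} (h : 0 ≤ n) :
    pvDigitSum n = n % 10 + pvDigitSum (n / 10) := by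
  rcases eq_or_lt_of_le h with h0 | h0
  · rw [← h0]; norm_num [pvDigitSum_nonpos le_rfl]
  · rw [pvDigitSum, if_pos h0, PySem.Int.mod_eq_emod_of_pos (by norm_num),
      PySem.Int.floordiv_eq_ediv_of_pos (by norm_num)]

theorem pvDigitSum_digit {g : Int} (h0 : 0 ≤ g) (h9 : g ≤ 9) : pvDigitSum g = g := by
  rw [pvDigitSum_step h0, Int.emod_eq_of_lt h0 (by omega),
    Int.ediv_eq_zero_of_lt h0 (by omega), pvDigitSum_nonpos le_rfl]
  omega

theorem pvDigitSum_split {g : Int} (hg0 : 0 ≤ g) (hg9 : g ≤ 9) :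
    ∀ (f : Nat) (r : Int), 0 ≤ r → r < 10 ^ f →
      pvDigitSum (g * 10 ^ f + r) = g + pvDigitSum r := by
  intro f
  induction f with
  | zero =>
    intro r h0 h1
    have : r = 0 := by simp [pow_zero] at h1; omega
    subst this
    simp [pvDigitSum_digit hg0 hg9, pvDigitSum_nonpos le_rfl]
  | succ f ih =>
    intro r h0 h1
    have hp : (0:Int) < 10 ^ f := by positivity
    have hN : 0 ≤ g * 10 ^ (f + 1) + r := by
      have : (0:Int) ≤ g * 10 ^ (f + 1) := by positivity
      omega
    have e0 : g * 10 ^ (f + 1) + r = r + 10 * (g * 10 ^ f) := by ring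
    have e1 : (g * 10 ^ (f + 1) + r) % 10 = r % 10 := by
      rw [e0, Int.add_mul_emod_self_left]
    have e2 : (g * 10 ^ (f + 1) + r) / 10 = g * 10 ^ f + r / 10 := by
      rw [e0, Int.add_mul_ediv_left _ _ (by norm_num : (10:Int) ≠ 0)]; ring
    have hrd0 : 0 ≤ r / 10 := Int.ediv_nonneg h0 (by norm_num)
    have hrdlt : r / 10 < 10 ^ f := by
      rw [Int.ediv_lt_iff_lt_mul (by norm_num : (0:Int) < 10)]
      calc r < 10 ^ (f + 1) := h1
        _ = 10 ^ f * 10 := by ring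
    rw [pvDigitSum_step hN, pvDigitSum_step h0, e1, e2, ih (r / 10) hrd0 hrdlt]
    ring

theorem pvNineDvd_aux (k : Nat) : ∀ n : Int, 0 ≤ n → n.toNat ≤ k →
    (9:Int) ∣ (n - pvDigitSum n) := by
  induction k with
  | zero =>
    intro n h0 hk
    have : n = 0 := by omega
    subst this; simp [pvDigitSum_nonpos le_rfl]
  | succ k ih =>
    intro n h0 hk
    by_cases hsmall : n.toNat ≤ k
    · exact ih n h0 hsmall
    · have h1 : 1 ≤ n := by omega
      have hq0 : 0 ≤ n / 10 := Int.ediv_nonneg h0 (by norm_num)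
      have hqk : (n / 10).toNat ≤ k := by omega
      obtain ⟨c, hc⟩ := ih (n / 10) hq0 hqk
      rw [pvDigitSum_step h0]
      exact ⟨n / 10 + c, by omega⟩

theorem pvNineDvd (n : Int) (h : 0 ≤ n) : (9:Int) ∣ (n - pvDigitSum n) :=
  pvNineDvd_aux n.toNat n h le_rfl

-- ---------- the abstract enumeration ----------

def pvLeaves (v need : Int) : Nat → List Int
  | 0 => if need = 0 then [v] else []
  | f + 1 => (List.range 10).flatMap
      (fun g : Nat => if (g : Int) ≤ need then pvLeaves (v * 10 + (g:Int)) (need - (g:Int)) f else [])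

def pvRoot (t L : Int) : List Int :=
  (List.range 10).flatMap
    (fun g : Nat => if 1 ≤ (g : Int) ∧ (g : Int) ≤ t then pvLeaves (g:Int) (t - (g:Int)) ((L - 1).toNat) else [])

def pvAll (t : Int) : List Int := (PySem.List.pyRange 1 19 1).flatMap (fun L => pvRoot t L)

def pvRunSeen (t d : Int) : List Int → PySem.Set Int → Option (Int × Int) × PySem.Set Int
  | [], s => (none, s)
  | n :: rest, s =>
    if PySem.Set.contains s (n + d) then (some (n, n + d), s)
    else if PySem.Set.contains s (n - d) then (some (n - d, n), s)
    else pvRunSeen t d rest (PySem.Set.add s n)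

def pvHit (t d k n : Int) : Option (Int × Int) :=
  if 1 ≤ n - k ∧ pvDigitSum (n - k) = t then
    (if d < 0 then some (n, n - k) else some (n - k, n)) else none

def pvHitA (t d n : Int) : Option (Int × Int) :=
  if 1 ≤ n + d ∧ pvDigitSum (n + d) = t ∧ n + d < n then some (n, n + d)
  else if 1 ≤ n - d ∧ pvDigitSum (n - d) = t ∧ n - d < n then some (n - d, n)
  else none

-- ---------- range chunking ----------

theorem pvRange_chunks {m : Int} (hm : 0 ≤ m) (w : Int) :
    ∀ j : Nat, PySem.List.pyRange (w * m) ((w + j) * m) 1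
      = (List.range j).flatMap (fun i : Nat => PySem.List.pyRange ((w + (i:Int)) * m) ((w + (i:Int) + 1) * m) 1) := by
  intro j
  induction j with
  | zero =>
    simp [PySem.List.pyRange_one_eq_nil]
  | succ j ih =>
    have hb1 : w * m ≤ (w + j) * m := by
      have : w ≤ w + (j:Int) := by omega
      exact mul_le_mul_of_nonneg_right this hm
    have hb2 : (w + j) * m ≤ (w + (j:Int) + 1) * m := by
      have : w + (j:Int) ≤ w + (j:Int) + 1 := by omega
      exact mul_le_mul_of_nonneg_right this hm
    rw [List.range_succ, List.flatMap_append]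
    have hcast : ((j:Int) + 1) = ((j + 1 : Nat) : Int) := by push_cast; ring
    rw [← ih]
    have : PySem.List.pyRange (w * m) ((w + (j+1:Nat)) * m) 1
        = PySem.List.pyRange (w * m) ((w + j) * m) 1
          ++ PySem.List.pyRange ((w + j) * m) ((w + (j:Int) + 1) * m) 1 := by
      rw [← PySem.List.pyRange_one_append (w * m) ((w + j) * m) ((w + (j:Int) + 1) * m) hb1 hb2]
      congr 2
      push_cast; ring
    rw [this]
    simp

-- one chunk of the enumeration, as a filtered range (hleq is pvLeaves_eq at depth f)
theorem pvChunk_of {g : Int} (hg0 : 0 ≤ g) (hg9 : g ≤ 9) (f : Nat) (off need : Int)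
    (hleq : pvLeaves (off * 10 + g) (need - g) f
      = (PySem.List.pyRange ((off * 10 + g) * 10 ^ f) ((off * 10 + g + 1) * 10 ^ f) 1).filter
          (fun x => pvDigitSum (x - (off * 10 + g) * 10 ^ f) == need - g)) :
    (PySem.List.pyRange ((off * 10 + g) * 10 ^ f) ((off * 10 + g + 1) * 10 ^ f) 1).filter
        (fun x => pvDigitSum (x - off * 10 ^ (f + 1)) == need)
      = if g ≤ need then pvLeaves (off * 10 + g) (need - g) f else [] := by
  have hp : (0:Int) < 10 ^ f := by positivity
  have key : ∀ x ∈ PySem.List.pyRange ((off * 10 + g) * 10 ^ f) ((off * 10 + g + 1) * 10 ^ f) 1,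
      pvDigitSum (x - off * 10 ^ (f + 1)) = g + pvDigitSum (x - (off * 10 + g) * 10 ^ f) := by
    intro x hx
    rw [PySem.List.mem_pyRange_one] at hx
    have hub : (off * 10 + g + 1) * 10 ^ f = (off * 10 + g) * 10 ^ f + 10 ^ f := by ring
    have hr0 : 0 ≤ x - (off * 10 + g) * 10 ^ f := by omega
    have hrlt : x - (off * 10 + g) * 10 ^ f < 10 ^ f := by rw [hub] at hx; omega
    have hoff : x - off * 10 ^ (f + 1) = g * 10 ^ f + (x - (off * 10 + g) * 10 ^ f) := by ring
    rw [hoff, pvDigitSum_split hg0 hg9 f _ hr0 hrlt]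
  by_cases hgn : g ≤ need
  · rw [if_pos hgn, hleq]
    apply List.filter_congr
    intro x hx
    rw [key x hx, Bool.eq_iff_iff]
    simp only [beq_iff_eq]
    omega
  · rw [if_neg hgn]
    rw [List.filter_eq_nil_iff]
    intro x hx
    rw [key x hx]
    have := pvDigitSum_nonneg (x - (off * 10 + g) * 10 ^ f)
    simp only [beq_iff_eq]
    omega

theorem pvLeaves_eq : ∀ (f : Nat) (v need : Int),
    pvLeaves v need f = (PySem.List.pyRange (v * 10 ^ f) ((v + 1) * 10 ^ f) 1).filter
      (fun x => pvDigitSum (x - v * 10 ^ f) == need) := by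
  intro f
  induction f with
  | zero =>
    intro v need
    simp only [pvLeaves, pow_zero, mul_one, PySem.List.pyRange_one_singleton]
    by_cases h : need = 0
    · subst h; simp [List.filter, pvDigitSum_nonpos le_rfl]
    · have hb : (0 == need) = false := beq_eq_false_iff_ne.mpr (Ne.symm h)
      simp [List.filter, pvDigitSum_nonpos le_rfl, h, hb]
  | succ f ih =>
    intro v need
    have h1 : PySem.List.pyRange (v * 10 ^ (f + 1)) ((v + 1) * 10 ^ (f + 1)) 1
        = PySem.List.pyRange ((v * 10) * 10 ^ f) ((v * 10 + (10:Nat)) * 10 ^ f) 1 := by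
      congr 1 <;> push_cast <;> ring
    rw [h1, pvRange_chunks (by positivity) (v * 10) 10, List.filter_flatMap]
    simp only [pvLeaves]
    apply List.flatMap_congr
    intro i hi
    rw [List.mem_range] at hi
    have hi0 : (0:Int) ≤ (i:Int) := by positivity
    have hi9 : (i:Int) ≤ 9 := by omega
    exact (pvChunk_of hi0 hi9 f v need (by rw [ih])).symm

theorem pvChunk0 {g : Int} (hg0 : 0 ≤ g) (hg9 : g ≤ 9) (f : Nat) (t : Int) :
    (PySem.List.pyRange (g * 10 ^ f) ((g + 1) * 10 ^ f) 1).filter (fun x => pvDigitSum x == t)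
      = if g ≤ t then pvLeaves g (t - g) f else [] := by
  have h := pvChunk_of hg0 hg9 f 0 t (pvLeaves_eq f (0 * 10 + g) (t - g))
  simpa using h

theorem pvRoot_eq (t : Int) (f : Nat) :
    pvRoot t ((f:Int) + 1)
      = (PySem.List.pyRange (10 ^ f) (10 ^ (f + 1)) 1).filter (fun x => pvDigitSum x == t) := by
  have htoNat : (((f:Int) + 1) - 1).toNat = f := by omega
  unfold pvRoot
  rw [htoNat]
  have h1 : PySem.List.pyRange (10 ^ f) (10 ^ (f + 1)) 1
      = PySem.List.pyRange (1 * 10 ^ f) ((1 + ((9:Nat):Int)) * 10 ^ f) 1 := by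
    congr 1 <;> push_cast <;> ring
  rw [h1, pvRange_chunks (by positivity) 1 9, List.filter_flatMap]
  have hr : List.range 10 = 0 :: (List.range 9).map Nat.succ := rfl
  rw [hr, List.flatMap_cons, List.flatMap_map]
  have h0 : (if 1 ≤ ((0:Nat):Int) ∧ ((0:Nat):Int) ≤ t
      then pvLeaves ((0:Nat):Int) (t - ((0:Nat):Int)) f else []) = [] := by norm_num
  rw [h0, List.nil_append]
  apply List.flatMap_congr
  intro i hi
  rw [List.mem_range] at hi
  have hg0 : (0:Int) ≤ (i:Int) + 1 := by positivity
  have hg9 : (i:Int) + 1 ≤ 9 := by omega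
  have hcast : ((Nat.succ i : Nat) : Int) = (i:Int) + 1 := by push_cast; ring
  simp only [Function.comp_apply, hcast]
  have hb1 : ((1:Int) + (i:Int)) * 10 ^ f = ((i:Int) + 1) * 10 ^ f := by ring
  have hb2 : ((1:Int) + (i:Int) + 1) * 10 ^ f = (((i:Int) + 1) + 1) * 10 ^ f := by ring
  rw [hb1, hb2, pvChunk0 hg0 hg9 f t]
  have h1le : (1:Int) ≤ (i:Int) + 1 := by omega
  simp [h1le]

theorem pvAll_flat (t : Int) : ∀ j : Nat,
    (PySem.List.pyRange 1 ((j:Int) + 1) 1).flatMap (fun L => pvRoot t L)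
      = (PySem.List.pyRange 1 (10 ^ j) 1).filter (fun x => pvDigitSum x == t) := by
  intro j
  induction j with
  | zero => simp [PySem.List.pyRange_one_eq_nil]
  | succ j ih =>
    have hsucc : PySem.List.pyRange 1 (((j+1:Nat):Int) + 1) 1
        = PySem.List.pyRange 1 ((j:Int) + 1) 1 ++ [(j:Int) + 1] := by
      have : ((j:Int) + 1) + 1 = (((j+1:Nat):Int) + 1) := by push_cast; ring
      rw [← this, PySem.List.pyRange_one_succ_right (by omega)]
    rw [hsucc, List.flatMap_append]
    have hroot : [(j:Int) + 1].flatMap (fun L => pvRoot t L) = pvRoot t ((j:Int) + 1) := by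
      simp
    rw [hroot, ih, pvRoot_eq t j]
    have hsplit : PySem.List.pyRange 1 (10 ^ (j + 1)) 1
        = PySem.List.pyRange 1 (10 ^ j) 1 ++ PySem.List.pyRange (10 ^ j) (10 ^ (j + 1)) 1 := by
      rw [← PySem.List.pyRange_one_append 1 (10 ^ j) (10 ^ (j + 1))
        (one_le_pow₀ (by norm_num)) (by apply pow_le_pow_right₀ <;> omega)]
    rw [hsplit, List.filter_append]

theorem pvAll_eq (t : Int) : pvAll t
    = (PySem.List.pyRange 1 (10 ^ 18) 1).filter (fun x => pvDigitSum x == t) := by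
  have h := pvAll_flat t 18
  have h19 : (((18:Nat):Int) + 1) = 19 := by norm_num
  rw [h19] at h
  exact h

-- ---------- A's backtracking = seen-run over the enumeration ----------

theorem pvRunSeen_append (t d : Int) (l1 l2 : List Int) : ∀ s : PySem.Set Int,
    pvRunSeen t d (l1 ++ l2) s
      = match pvRunSeen t d l1 s with
        | (some r, s') => (some r, s')
        | (none, s') => pvRunSeen t d l2 s' := by
  induction l1 with
  | nil => intro s; simp [pvRunSeen]
  | cons n l1 ih =>
    intro s
    simp only [List.cons_append, pvRunSeen]
    split_ifs <;> simp [ih]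

theorem pvToChars_digit : ∀ g : Int, 0 ≤ g → g ≤ 9 →
    PySem.Int.toChars g = [Char.ofNat (48 + g.toNat)] := by
  intro g h0 h9
  interval_cases g <;> decide

theorem pvIntOfDigits_append (cs : List Char) (g : Int) (h0 : 0 ≤ g) (h9 : g ≤ 9) :
    pvIntOfDigits (cs ++ PySem.Int.toChars g) = pvIntOfDigits cs * 10 + g := by
  rw [pvToChars_digit g h0 h9]
  unfold pvIntOfDigits
  rw [List.foldl_append]
  simp only [List.foldl_cons, List.foldl_nil]
  have hc : ((Char.ofNat (48 + g.toNat)).toNat : Int) = 48 + g := by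
    interval_cases g <;> decide
  rw [hc]; ring

theorem pvBacktrack_eq (t d : Int) : ∀ (F : Nat) (fuel : Nat) (cur : List Char)
    (len ds maxL : Int) (s : PySem.Set Int),
    F + 1 ≤ fuel → 1 ≤ len → len ≤ maxL → maxL - len = (F:Int) →
    pvBacktrack t d fuel cur len ds maxL s
      = pvRunSeen t d (pvLeaves (pvIntOfDigits cur) (t - ds) F) s := by
  intro F
  induction F with
  | zero =>
    intro fuel cur len ds maxL s hf h1 h2 h3
    obtain ⟨fuel', rfl⟩ : ∃ fuel', fuel = fuel' + 1 := ⟨fuel - 1, by omega⟩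
    have hlm : len = maxL := by omega
    rw [pvBacktrack, if_pos (by simp [hlm])]
    by_cases hds : ds = t
    · have hleaf : pvLeaves (pvIntOfDigits cur) (t - ds) 0 = [pvIntOfDigits cur] := by
        simp only [pvLeaves, if_pos (show t - ds = 0 by omega)]
      rw [if_pos (by simp [hds]), hleaf]
      simp [pvRunSeen]
    · have hleaf : pvLeaves (pvIntOfDigits cur) (t - ds) 0 = [] := by
        simp only [pvLeaves, if_neg (show ¬ (t - ds = 0) by omega)]
      rw [if_neg (by simp [hds]), hleaf]
      simp [pvRunSeen]
  | succ F ihF =>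
    intro fuel cur len ds maxL s hf h1 h2 h3
    obtain ⟨fuel', rfl⟩ : ∃ fuel', fuel = fuel' + 1 := ⟨fuel - 1, by omega⟩
    have hlm : ¬ (len = maxL) := by omega
    rw [pvBacktrack, if_neg (by simp [hlm])]
    have hloop : ∀ (gl : List Nat) (s : PySem.Set Int), (∀ g ∈ gl, g ≤ 9) →
        pvDigitLoop t d fuel' cur len ds maxL s (gl.map (fun k : Nat => (k:Int)))
          = pvRunSeen t d (gl.flatMap (fun g : Nat => if (g:Int) ≤ t - ds then
              pvLeaves (pvIntOfDigits cur * 10 + (g:Int)) (t - ds - (g:Int)) F else [])) s := by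
      intro gl
      induction gl with
      | nil => intro s _; simp [pvDigitLoop, pvRunSeen]
      | cons g gl ihg =>
        intro s hb
        simp only [List.map_cons, List.flatMap_cons]
        rw [pvDigitLoop]
        have hlen0 : (len == (0:Int) && ((g:Nat):Int) == (0:Int)) = false := by
          simp only [Bool.and_eq_false_iff]
          left; simp; omega
        rw [hlen0]
        simp only [Bool.false_eq_true, if_false]
        by_cases hguard : ds + (g:Int) ≤ t
        · rw [if_pos hguard]
          have hg9 : ((g:Nat):Int) ≤ 9 := by exact_mod_cast hb g (by simp)
          have hcall := ihF fuel' (cur ++ PySem.Int.toChars (g:Int)) (len+1) (ds + (g:Int)) maxL s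
            (by omega) (by omega) (by omega) (by push_cast; push_cast at h3; omega)
          rw [pvIntOfDigits_append cur (g:Int) (by positivity) hg9] at hcall
          rw [hcall]
          rw [pvRunSeen_append]
          rw [if_pos (by omega : (g:Int) ≤ t - ds)]
          have eneed : t - (ds + (g:Int)) = t - ds - (g:Int) := by ring
          rw [eneed]
          cases hres : pvRunSeen t d (pvLeaves (pvIntOfDigits cur * 10 + (g:Int)) (t - ds - (g:Int)) F) s with
          | mk o s' =>
            cases o with
            | some r => simp
            | none => simp [ihg s' (fun x hx => hb x (by simp [hx]))]
        · rw [if_neg hguard]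
          rw [if_neg (by omega : ¬ ((g:Int) ≤ t - ds))]
          simp only [List.nil_append]
          exact ihg s (fun x hx => hb x (by simp [hx]))
    have hrange : PySem.List.pyRange 0 10 1 = (List.range 10).map (fun k : Nat => (k : Int)) := by
      decide
    rw [hrange, hloop (List.range 10) s (by intro g hg; rw [List.mem_range] at hg; omega)]
    simp only [pvLeaves]

theorem pvBacktrack_root (t d : Int) (L : Int) (fuel : Nat) (s : PySem.Set Int)
    (h1 : 1 ≤ L) (hf : (L - 1).toNat + 2 ≤ fuel) :
    pvBacktrack t d fuel [] 0 0 L s = pvRunSeen t d (pvRoot t L) s := by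
  obtain ⟨fuel', rfl⟩ : ∃ f', fuel = f' + 1 := ⟨fuel - 1, by omega⟩
  rw [pvBacktrack, if_neg (by simp; omega)]
  have hloop : ∀ (gl : List Nat) (s : PySem.Set Int), (∀ g ∈ gl, g ≤ 9) →
      pvDigitLoop t d fuel' [] 0 0 L s (gl.map (fun k : Nat => (k:Int)))
        = pvRunSeen t d (gl.flatMap (fun g : Nat => if 1 ≤ (g:Int) ∧ (g:Int) ≤ t then
            pvLeaves (g:Int) (t - (g:Int)) ((L-1).toNat) else [])) s := by
    intro gl
    induction gl with
    | nil => intro s _; simp [pvDigitLoop, pvRunSeen]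
    | cons g gl ihg =>
      intro s hb
      simp only [List.map_cons, List.flatMap_cons]
      rw [pvDigitLoop]
      by_cases hg0 : g = 0
      · subst hg0
        rw [if_pos (by decide)]
        rw [if_neg (by norm_num)]
        simp only [List.nil_append]
        exact ihg s (fun x hx => hb x (by simp [hx]))
      · have hgl : (1:Int) ≤ (g:Int) := by
          have := Nat.pos_of_ne_zero hg0; exact_mod_cast this
        have hcond : ((0:Int) == (0:Int) && ((g:Nat):Int) == (0:Int)) = false := by
          simp only [Bool.and_eq_false_iff]
          right; simp; omega
        rw [hcond]
        simp only [Bool.false_eq_true, if_false]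
        have hg9 : ((g:Nat):Int) ≤ 9 := by exact_mod_cast hb g (by simp)
        by_cases hguard : (0:Int) + (g:Int) ≤ t
        · rw [if_pos hguard]
          have hcall := pvBacktrack_eq t d ((L-1).toNat) fuel' ([] ++ PySem.Int.toChars (g:Int))
            ((0:Int) + 1) ((0:Int) + (g:Int)) L s (by omega) (by omega) (by omega) (by omega)
          rw [pvIntOfDigits_append [] (g:Int) (by positivity) hg9] at hcall
          have hval : pvIntOfDigits [] * 10 + (g:Int) = (g:Int) := by
            simp [pvIntOfDigits]
          rw [hval] at hcall
          rw [hcall, pvRunSeen_append]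
          rw [if_pos ⟨hgl, by omega⟩]
          have eneed : t - ((0:Int) + (g:Int)) = t - (g:Int) := by ring
          rw [eneed]
          cases hres : pvRunSeen t d (pvLeaves (g:Int) (t - (g:Int)) ((L-1).toNat)) s with
          | mk o s' =>
            cases o with
            | some r => simp
            | none => simp [ihg s' (fun x hx => hb x (by simp [hx]))]
        · rw [if_neg hguard]
          rw [if_neg (by omega : ¬ (1 ≤ (g:Int) ∧ (g:Int) ≤ t))]
          simp only [List.nil_append]
          exact ihg s (fun x hx => hb x (by simp [hx]))
  have hrange : PySem.List.pyRange 0 10 1 = (List.range 10).map (fun k : Nat => (k : Int)) := by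
    decide
  rw [hrange, hloop (List.range 10) s (by intro g hg; rw [List.mem_range] at hg; omega)]
  rfl

theorem pvLengthLoop_eq (t d : Int) : ∀ (Ls : List Int) (s : PySem.Set Int),
    (∀ L ∈ Ls, 1 ≤ L ∧ L ≤ 18) →
    pvLengthLoop t d Ls s = (pvRunSeen t d (Ls.flatMap (fun L => pvRoot t L)) s).1 := by
  intro Ls
  induction Ls with
  | nil => intro s _; simp [pvLengthLoop, pvRunSeen]
  | cons L Ls ih =>
    intro s hb
    rw [pvLengthLoop]
    rw [pvBacktrack_root t d L 19 s (hb L (by simp)).1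
      (by have := (hb L (by simp)).2; have := (hb L (by simp)).1; omega)]
    rw [List.flatMap_cons, pvRunSeen_append]
    cases hres : pvRunSeen t d (pvRoot t L) s with
    | mk o s' =>
      cases o with
      | some r => simp
      | none => simp [ih s' (fun x hx => hb x (by simp [hx]))]

theorem pvA_eq (t d : Int) :
    generate_numbers_with_digit_sum t d = (pvRunSeen t d (pvAll t) PySem.Set.empty).1 := by
  unfold generate_numbers_with_digit_sum pvAll
  exact pvLengthLoop_eq t d _ _ (by
    intro L hL
    rw [PySem.List.mem_pyRange_one] at hL
    omega)

-- ---------- B's stack machine = findSome? over the enumeration ----------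

theorem pvFind_congr {α β : Type} (f g : α → Option β) :
    ∀ l : List α, (∀ x ∈ l, f x = g x) → l.findSome? f = l.findSome? g := by
  intro l
  induction l with
  | nil => intro _; rfl
  | cons x l ih =>
    intro h
    simp only [List.findSome?_cons, h x (by simp)]
    cases g x with
    | some b => rfl
    | none => exact ih (fun y hy => h y (by simp [hy]))

theorem pvFoldl_push_eq {α : Type} (c : Int → α) (need : Int) :
    ∀ (l : List Int) (st : List α),
      l.foldl (fun st dig => if dig ≤ need then c dig :: st else st) st
        = (l.reverse.flatMap (fun dig => if dig ≤ need then [c dig] else [])) ++ st := by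
  intro l
  induction l with
  | nil => intro st; simp
  | cons x l ih =>
    intro st
    simp only [List.foldl_cons, List.reverse_cons, List.flatMap_append]
    rw [ih]
    by_cases h : x ≤ need <;> simp [h]

theorem pvFlatten_children {α : Type} (f : α → List Int) (c : Int → α) (need : Int) :
    ∀ l : List Int,
    ((l.flatMap (fun dig => if dig ≤ need then [c dig] else [])).map f).flatten
      = l.flatMap (fun dig => if dig ≤ need then f (c dig) else []) := by
  intro l
  induction l with
  | nil => simp
  | cons x l ih =>
    simp only [List.flatMap_cons, List.map_append, List.flatten_append, ih]
    by_cases h : x ≤ need <;> simp [h]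

theorem pvRun_eq (t d k : Int) : ∀ st : List (Int × Nat × Int),
    pvRun t d k st
      = ((st.map (fun fr => pvLeaves fr.1 fr.2.2 fr.2.1)).flatten).findSome? (pvHit t d k) := by
  intro st
  induction st using pvRun.induct t d k with
  | case1 => simp [pvRun]
  | case2 value need st hneed oth hd hdl =>
    have hn0 : need = 0 := by simpa using hneed
    have hd' : 1 ≤ value - k ∧ pvDigitSum (value - k) = t := hd
    rw [pvRun, if_pos hneed]
    simp [pvHit, pvLeaves, hn0, hd', hdl, List.findSome?_cons]
  | case3 value need st hneed oth hd hdl =>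
    have hn0 : need = 0 := by simpa using hneed
    have hd' : 1 ≤ value - k ∧ pvDigitSum (value - k) = t := hd
    rw [pvRun, if_pos hneed]
    simp [pvHit, pvLeaves, hn0, hd', hdl, List.findSome?_cons]
  | case4 value need st hneed oth hno ih =>
    have hn0 : need = 0 := by simpa using hneed
    have hno' : ¬ (1 ≤ value - k ∧ pvDigitSum (value - k) = t) := hno
    rw [pvRun, if_pos hneed, if_neg hno]
    simp only [List.map_cons, List.flatten_cons]
    rw [show pvLeaves (value, (0:Nat), need).1 (value, (0:Nat), need).2.2 (value, (0:Nat), need).2.1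
        = [value] from by simp [pvLeaves, hn0]]
    rw [List.singleton_append, List.findSome?_cons]
    simp only [pvHit, if_neg hno']
    exact ih
  | case5 value need st hneed ih =>
    have hn0 : ¬ (need = 0) := by simpa using hneed
    rw [pvRun, if_neg hneed]
    simpa [pvLeaves, hn0] using ih
  | case6 value need st rem' ih =>
    rw [pvRun]
    simp only [dite_eq_ite] at ih
    have hps := pvFoldl_push_eq (fun dig => (value * 10 + dig, rem', need - dig)) need
      (PySem.List.pyRange 9 (-1) (-1)) st
    rw [hps] at ih
    rw [hps, ih]
    rw [List.map_append, List.flatten_append]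
    simp only [List.map_cons, List.flatten_cons]
    congr 1
    rw [pvFlatten_children (fun fr => pvLeaves fr.1 fr.2.2 fr.2.1)
      (fun dig => (value * 10 + dig, rem', need - dig)) need]
    have hrev : (PySem.List.pyRange 9 (-1) (-1)).reverse
        = (List.range 10).map (fun k : Nat => (k:Int)) := by decide
    rw [hrev, List.flatMap_map]
    simp only [pvLeaves, Function.comp]

theorem pvInitStack_eq (t L : Int) :
    ((pvInitStack t L).map (fun fr => pvLeaves fr.1 fr.2.2 fr.2.1)).flatten = pvRoot t L := by
  unfold pvInitStack pvRoot
  rw [pvFoldl_push_eq (fun first => (first, (L-1).toNat, t - first)) t (PySem.List.pyRange 9 0 (-1)) []]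
  rw [List.append_nil]
  rw [pvFlatten_children (fun fr => pvLeaves fr.1 fr.2.2 fr.2.1)
    (fun first => (first, (L-1).toNat, t - first)) t]
  have hrev : (PySem.List.pyRange 9 0 (-1)).reverse
      = (List.range 9).map (fun k : Nat => (k:Int) + 1) := by decide
  rw [hrev, List.flatMap_map]
  have hr : List.range 10 = 0 :: (List.range 9).map Nat.succ := rfl
  rw [hr, List.flatMap_cons, List.flatMap_map]
  have h0 : (if 1 ≤ ((0:Nat):Int) ∧ ((0:Nat):Int) ≤ t
      then pvLeaves ((0:Nat):Int) (t - ((0:Nat):Int)) ((L-1).toNat) else []) = [] := by norm_num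
  rw [h0, List.nil_append]
  apply List.flatMap_congr
  intro i _
  simp only [Function.comp_apply]
  have hcast : ((Nat.succ i : Nat) : Int) = (i:Int) + 1 := by push_cast; ring
  rw [hcast]
  have h1 : (1:Int) ≤ (i:Int) + 1 := by omega
  by_cases h : (i:Int) + 1 ≤ t
  · rw [if_pos h, if_pos ⟨h1, h⟩]
  · rw [if_neg h, if_neg (by omega)]

theorem pvLenLoop_eq (t d k : Int) : ∀ Ls : List Int,
    pvLenLoop t d k Ls = (Ls.flatMap (fun L => pvRoot t L)).findSome? (pvHit t d k) := by
  intro Ls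
  induction Ls with
  | nil => simp [pvLenLoop]
  | cons L Ls ih =>
    rw [pvLenLoop, pvRun_eq, pvInitStack_eq, List.flatMap_cons, List.findSome?_append]
    cases h : (pvRoot t L).findSome? (pvHit t d k) <;> simp [h, ih]

-- ---------- the seen-set run is a findSome? over the sorted complete candidate list ----------

theorem pvRunSeen_to_find (t d : Int) : ∀ (Fk : Nat) (a : Int) (s : PySem.Set Int),
    1 ≤ a → ((10:Int)^18 - a).toNat = Fk →
    (∀ x : Int, x ∈ s ↔ (1 ≤ x ∧ pvDigitSum x = t ∧ x < a)) →
    (pvRunSeen t d ((PySem.List.pyRange a ((10:Int)^18) 1).filter (fun x => pvDigitSum x == t)) s).1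
      = ((PySem.List.pyRange a ((10:Int)^18) 1).filter (fun x => pvDigitSum x == t)).findSome? (pvHitA t d) := by
  intro Fk
  induction Fk with
  | zero =>
    intro a s ha hF hs
    have hle : (10:Int)^18 ≤ a := by omega
    rw [PySem.List.pyRange_one_eq_nil hle]
    simp [pvRunSeen]
  | succ Fk ih =>
    intro a s ha hF hs
    have hlt : a < (10:Int)^18 := by omega
    rw [PySem.List.pyRange_one_cons hlt]
    by_cases hpa : pvDigitSum a = t
    · rw [List.filter_cons_of_pos (by simpa using hpa)]
      rw [pvRunSeen, List.findSome?_cons]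
      by_cases h1 : 1 ≤ a + d ∧ pvDigitSum (a + d) = t ∧ a + d < a
      · have hc : PySem.Set.contains s (a + d) = true :=
          (PySem.Set.contains_iff s _).mpr ((hs _).mpr h1)
        rw [if_pos hc]
        rw [show pvHitA t d a = some (a, a + d) from by rw [pvHitA, if_pos h1]]
      · have hc : ¬ (PySem.Set.contains s (a + d) = true) := by
          rw [PySem.Set.contains_iff s _]
          intro hmem
          exact h1 ((hs _).mp hmem)
        rw [if_neg hc]
        by_cases h2 : 1 ≤ a - d ∧ pvDigitSum (a - d) = t ∧ a - d < a
        · have hc2 : PySem.Set.contains s (a - d) = true :=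
            (PySem.Set.contains_iff s _).mpr ((hs _).mpr h2)
          rw [if_pos hc2]
          rw [show pvHitA t d a = some (a - d, a) from by rw [pvHitA, if_neg h1, if_pos h2]]
        · have hc2 : ¬ (PySem.Set.contains s (a - d) = true) := by
            rw [PySem.Set.contains_iff s _]
            intro hmem
            exact h2 ((hs _).mp hmem)
          rw [if_neg hc2]
          rw [show pvHitA t d a = none from by rw [pvHitA, if_neg h1, if_neg h2]]
          have hs' : ∀ x : Int, x ∈ PySem.Set.add s a ↔ (1 ≤ x ∧ pvDigitSum x = t ∧ x < a + 1) := by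
            intro x
            rw [PySem.Set.mem_add]
            constructor
            · rintro (hx | rfl)
              · obtain ⟨u, v, w⟩ := (hs x).mp hx
                exact ⟨u, v, by omega⟩
              · exact ⟨by omega, hpa, by omega⟩
            · rintro ⟨u, v, w⟩
              by_cases hxa : x = a
              · right; exact hxa
              · left; exact (hs x).mpr ⟨u, v, by omega⟩
          exact ih (a + 1) (PySem.Set.add s a) (by omega) (by omega) hs'
    · rw [List.filter_cons_of_neg (by simpa using hpa)]
      refine ih (a + 1) s (by omega) (by omega) ?_
      intro x
      rw [hs x]
      constructor
      · rintro ⟨u, v, w⟩; exact ⟨u, v, by omega⟩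
      · rintro ⟨u, v, w⟩
        refine ⟨u, v, ?_⟩
        by_cases hxa : x = a
        · subst hxa; exact absurd v hpa
        · omega

-- ---------- relating the two hit tests ----------

theorem pvHitA_eq_pvHit (t d n : Int) (hd : d ≠ 0) :
    pvHitA t d n = pvHit t d (if 0 < d then d else -d) n := by
  unfold pvHitA pvHit
  by_cases hpos : 0 < d
  · rw [if_pos hpos]
    rw [if_neg (by rintro ⟨_, _, hlt⟩; omega)]
    by_cases h2 : 1 ≤ n - d ∧ pvDigitSum (n - d) = t
    · rw [if_pos ⟨h2.1, h2.2, by omega⟩, if_pos h2, if_neg (by omega)]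
    · rw [if_neg (by rintro ⟨u, v, _⟩; exact h2 ⟨u, v⟩), if_neg h2]
  · have hneg : d < 0 := by omega
    rw [if_neg hpos]
    simp only [sub_neg_eq_add]
    by_cases h2 : 1 ≤ n + d ∧ pvDigitSum (n + d) = t
    · rw [if_pos ⟨h2.1, h2.2, by omega⟩, if_pos h2, if_pos hneg]
    · rw [if_neg (by rintro ⟨u, v, _⟩; exact h2 ⟨u, v⟩),
        if_neg (by rintro ⟨_, _, hlt⟩; omega), if_neg h2]

theorem pvHitA_none_of_d0 (t n : Int) : pvHitA t 0 n = none := by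
  unfold pvHitA
  rw [if_neg (by rintro ⟨_, _, hlt⟩; omega), if_neg (by rintro ⟨_, _, hlt⟩; omega)]

theorem pvHitA_none_of_not9 (t d n : Int) (h9 : ¬ (9:Int) ∣ d)
    (h1 : 1 ≤ n) (hn : pvDigitSum n = t) : pvHitA t d n = none := by
  unfold pvHitA
  rw [if_neg, if_neg]
  · rintro ⟨u, v, _⟩
    have hA := pvNineDvd (n - d) (by omega)
    have hB := pvNineDvd n (by omega)
    rw [v] at hA
    rw [hn] at hB
    exact h9 (by omega)
  · rintro ⟨u, v, _⟩
    have hA := pvNineDvd (n + d) (by omega)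
    have hB := pvNineDvd n (by omega)
    rw [v] at hA
    rw [hn] at hB
    exact h9 (by omega)

-- ===== VERDICT (by name: the statement is the Claim_ definition above) =====
theorem pvMembers (t : Int) :
    ∀ x ∈ (PySem.List.pyRange 1 ((10:Int)^18) 1).filter (fun x => pvDigitSum x == t),
      1 ≤ x ∧ pvDigitSum x = t := by
  intro x hx
  rw [List.mem_filter, PySem.List.mem_pyRange_one] at hx
  exact ⟨hx.1.1, by simpa using hx.2⟩

theorem pvA_find (t d : Int) :
    generate_numbers_with_digit_sum t d
      = ((PySem.List.pyRange 1 ((10:Int)^18) 1).filter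
          (fun x => pvDigitSum x == t)).findSome? (pvHitA t d) := by
  rw [pvA_eq, pvAll_eq]
  refine pvRunSeen_to_find t d ((10:Int)^18 - 1).toNat 1 PySem.Set.empty (by norm_num) rfl ?_
  intro x
  constructor
  · intro hx; exact absurd hx (by simp [PySem.Set.empty])
  · rintro ⟨u, _, w⟩; omega

theorem generate_numbers_with_digit_sum_spec : Claim_equal_generate_numbers_with_digit_sum := by
  unfold Claim_equal_generate_numbers_with_digit_sum
  intro t d _
  unfold Spec_generate_numbers_with_digit_sum
  by_cases hguard : (d == 0 || PySem.Int.mod d 9 != 0) = true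
  · have hB : generate_numbers_with_digit_sum_alt t d = none := by
      unfold generate_numbers_with_digit_sum_alt
      rw [if_pos hguard]
    rw [hB, pvA_find]
    rw [List.findSome?_eq_none_iff]
    intro x hx
    obtain ⟨hx1, hx2⟩ := pvMembers t x hx
    have hor : (d == 0) = true ∨ (PySem.Int.mod d 9 != 0) = true := by
      simpa [Bool.or_eq_true] using hguard
    rcases hor with h | h
    · have : d = 0 := by simpa using h
      subst this
      exact pvHitA_none_of_d0 t x
    · have h9 : ¬ (9:Int) ∣ d := by
        intro hdvd
        have := (PySem.Int.mod_eq_zero_iff_dvd d 9).mpr hdvd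
        simp [this] at h
        exact h hdvd
      exact pvHitA_none_of_not9 t d x h9 hx1 hx2
  · have hd0 : d ≠ 0 := by
      intro h; subst h; simp at hguard
    have hB : generate_numbers_with_digit_sum_alt t d
        = ((PySem.List.pyRange 1 ((10:Int)^18) 1).filter
            (fun x => pvDigitSum x == t)).findSome? (pvHit t d (if 0 < d then d else -d)) := by
      unfold generate_numbers_with_digit_sum_alt
      rw [if_neg hguard, pvLenLoop_eq]
      have := pvAll_flat t 18
      have h19 : (((18:Nat):Int) + 1) = 19 := by norm_num
      rw [h19] at this
      rw [this]
    rw [hB, pvA_find]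
    apply pvFind_congr
    intro x hx
    obtain ⟨hx1, hx2⟩ := pvMembers t x hx
    exact pvHitA_eq_pvHit t d x hd0
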